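-- pv_equiv track=rewrite | github.com/xupeilin/dau_predict | dau_decr.py | stock_dau_real_arr
-- ===== SOURCE A (Python) =====
-- stock_dau_real = {
--   0:  51332,
--   1:  38437,
--   2:  34738,
--   3:  32093,
--   4:  31715,
--   5:  31585,
--   6:  30988,
--   7:  28766,
--   8:  27803,
--   9:  27203,
--   10: 27144,
--   11: 26690,
--   12: 24636,
--   13: 25228,
--   14: 24133,
--   15: 24350,
--   16: 23617,
-- }
--
-- def stock_dau_real_arr(days):
--   dau_arr = [0]*days
--   for i in range(0, days):
--     if i in stock_dau_real:
--       dau_arr[i] = stock_dau_real[i]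
--     else:
--       dau_arr[i] = None
--   return dau_arr
-- ===== SOURCE B (Python) =====
-- stock_dau_real = {
--   0:  51332,
--   1:  38437,
--   2:  34738,
--   3:  32093,
--   4:  31715,
--   5:  31585,
--   6:  30988,
--   7:  28766,
--   8:  27803,
--   9:  27203,
--   10: 27144,
--   11: 26690,
--   12: 24636,
--   13: 25228,
--   14: 24133,
--   15: 24350,
--   16: 23617,
-- }
--
-- def stock_dau_real_arr(days):
--   # Closed form: the known values live at the contiguous sorted key positions
--   # 0..len-1, so the answer is just a slice of that value list padded with None.
--   vals = [stock_dau_real[k] for k in sorted(stock_dau_real)]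
--   return vals[:max(days, 0)] + [None] * (days - len(vals))
-- ===== Notes on version B (the rewrite author's own statement) =====
-- stated objective: faster
-- what changed: A loops index by index over range(days) with a per-index dict membership test and lookup; B uses no per-index loop at all: it materialises the dict's values in sorted-key order once (the keys are contiguous 0..16), slices that list to the requested length and pads the remainder with None by bulk list operations.
import Mathlib
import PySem

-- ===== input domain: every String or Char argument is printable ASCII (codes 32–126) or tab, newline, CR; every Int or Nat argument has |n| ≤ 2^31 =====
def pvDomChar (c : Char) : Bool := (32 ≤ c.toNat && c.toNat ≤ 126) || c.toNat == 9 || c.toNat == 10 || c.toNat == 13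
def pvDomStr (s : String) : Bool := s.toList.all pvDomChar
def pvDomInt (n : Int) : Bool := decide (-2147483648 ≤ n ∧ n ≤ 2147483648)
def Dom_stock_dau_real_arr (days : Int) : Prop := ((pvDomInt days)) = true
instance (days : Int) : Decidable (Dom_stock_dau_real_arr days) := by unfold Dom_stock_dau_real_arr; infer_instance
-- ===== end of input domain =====

-- B replaces A's per-index gather loop by a loop-free closed form: the dict's values in
-- sorted-key order (keys are contiguous 0..16), sliced to the requested length and padded with None.

-- the module-level dict stock_dau_real (shared context of A and B)
def stockDauReal : PySem.Dict Int Int := PySem.Dict.mk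
  [(0, 51332), (1, 38437), (2, 34738), (3, 32093), (4, 31715), (5, 31585), (6, 30988),
   (7, 28766), (8, 27803), (9, 27203), (10, 27144), (11, 26690), (12, 24636), (13, 25228),
   (14, 24133), (15, 24350), (16, 23617)]

-- ===== PORT A =====
def stock_dau_real_arr (days : Int) : List (Option Int) :=
  let dau_arr : List (Option Int) := List.replicate days.toNat (some 0)  -- [0]*days
  (PySem.List.pyRange 0 days 1).foldl
    (fun dau_arr i =>
      if stockDauReal.contains i then
        dau_arr.set i.toNat (some (stockDauReal.getD i 0))   -- dau_arr[i] = stock_dau_real[i]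
      else
        dau_arr.set i.toNat none)                            -- dau_arr[i] = None
    dau_arr

-- ===== PORT B =====
def stock_dau_real_arr_alt (days : Int) : List (Option Int) :=
  -- vals = [stock_dau_real[k] for k in sorted(stock_dau_real)]
  -- (subscript on a key drawn from the dict itself: get? is exact, never none here)
  let vals : List (Option Int) :=
    (PySem.List.sorted stockDauReal.keys (fun k => k)).map (fun k => stockDauReal.get? k)
  -- vals[:max(days, 0)] + [None] * (days - len(vals))
  PySem.List.slice vals none (some (max days 0)) ++
    List.replicate (days - (vals.length : Int)).toNat none

-- ===== PRECONDITION & SPEC =====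
def Spec_stock_dau_real_arr (days : Int) (out : List (Option Int)) : Prop := out = stock_dau_real_arr_alt days
instance (days : Int) (out : List (Option Int)) : Decidable (Spec_stock_dau_real_arr days out) := by unfold Spec_stock_dau_real_arr; infer_instance

-- ===== CLAIM (what is proved, stated in full; the proofs are below) =====
def Claim_equal_stock_dau_real_arr : Prop := ∀ (days : Int), Dom_stock_dau_real_arr days → Spec_stock_dau_real_arr days (stock_dau_real_arr days)

-- ===== LEMMAS AND PROOFS =====

-- keys beyond 16 are not in the dict
theorem get?_stockDauReal_of_ge (x : Int) (hx : 17 ≤ x) : stockDauReal.get? x = none := by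
  simp only [PySem.Dict.get?]
  rw [List.find?_eq_none.mpr]
  · rfl
  · intro p hp
    have hmem : p ∈ stockDauReal.items := hp
    have : p.1 ≤ 16 := by
      revert hmem
      have : ∀ q ∈ stockDauReal.items, q.1 ≤ 16 := by decide
      exact this p
    simp only [beq_iff_eq]
    omega

-- a write loop over range(n) into a list of length ≥ n overwrites the prefix with the values
theorem foldl_set_range (g : Nat → Option Int) :
    ∀ (n : Nat) (l : List (Option Int)), n ≤ l.length →
      (List.range n).foldl (fun acc j => acc.set j (g j)) l
        = (List.range n).map g ++ l.drop n := by
  intro n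
  induction n with
  | zero => intro l _; simp
  | succ m ih =>
    intro l hl
    have hm : m < l.length := hl
    rw [List.range_succ, List.foldl_append, ih l (Nat.le_of_succ_le hl)]
    simp only [List.foldl_cons, List.foldl_nil, List.map_append, List.map_cons, List.map_nil]
    rw [List.set_append, if_neg (by simp)]
    rw [List.length_map, List.length_range, Nat.sub_self]
    rw [List.drop_eq_getElem_cons hm, List.set_cons_zero]
    simp [List.append_assoc]

-- characterisation of A: the gather loop produces the per-index lookups
theorem A_char (days : Int) :
    stock_dau_real_arr days
      = (List.range days.toNat).map (fun (j : Nat) => stockDauReal.get? (j : Int)) := by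
  unfold stock_dau_real_arr
  rw [PySem.List.pyRange_one, List.foldl_map]
  have hsub : ((days : Int) - 0).toNat = days.toNat := by omega
  rw [hsub]
  rw [PySem.List.foldl_congr_mem _ _
      (fun acc (j : Nat) => acc.set j (stockDauReal.get? (j : Int))) _ ?_]
  · rw [foldl_set_range _ days.toNat (List.replicate days.toNat (some 0)) (by simp)]
    simp [List.drop_replicate]
  · intro acc j _
    simp only [zero_add, Int.toNat_natCast]
    cases h : stockDauReal.get? (j : Int) with
    | none =>
      have hc : stockDauReal.contains (j : Int) = false := by
        rw [PySem.Dict.contains_eq_isSome_get?, h]; rfl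
      rw [hc]; simp
    | some v =>
      have hc : stockDauReal.contains (j : Int) = true := by
        rw [PySem.Dict.contains_eq_isSome_get?, h]; rfl
      rw [hc]
      simp [PySem.Dict.getD_of_get?_eq_some _ _ h]

-- the concrete value list B builds, named so 'decide' can evaluate it once
theorem vals_eq :
    (PySem.List.sorted stockDauReal.keys (fun k => k)).map (fun k => stockDauReal.get? k)
      = (List.range 17).map (fun (j : Nat) => stockDauReal.get? (j : Int)) := by
  decide

theorem main_eq (days : Int) : stock_dau_real_arr days = stock_dau_real_arr_alt days := by
  simp only [stock_dau_real_arr_alt]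
  rw [A_char, vals_eq]
  by_cases hle : days ≤ 0
  · -- days ≤ 0: both sides empty
    have h0 : days.toNat = 0 := by omega
    have hmax : max days 0 = 0 := by omega
    rw [h0, hmax]
    have hneg : (days - ((((List.range 17).map (fun (j : Nat) => stockDauReal.get? (j : Int))).length : Nat) : Int)).toNat = 0 := by
      simp only [List.length_map, List.length_range]; omega
    rw [hneg]
    simp [PySem.List.slice_to]
  · have hpos : 0 < days := by omega
    by_cases h17 : days < 17
    · -- 1 ≤ days ≤ 16
      interval_cases days <;> decide
    · -- 17 ≤ days
      have h17' : 17 ≤ days := by omega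
      have hmax : max days 0 = days := by omega
      rw [hmax, PySem.List.slice_to _ (show (0:Int) ≤ days by omega)]
      have hlen : ((((List.range 17).map (fun (j : Nat) => stockDauReal.get? (j : Int))).length : Nat) : Int) = 17 := by
        simp
      rw [hlen]
      have htake : ((List.range 17).map (fun (j : Nat) => stockDauReal.get? (j : Int))).take days.toNat
          = (List.range 17).map (fun (j : Nat) => stockDauReal.get? (j : Int)) := by
        apply List.take_of_length_le
        simp only [List.length_map, List.length_range]
        omega
      rw [htake]
      have hn : days.toNat = 17 + (days.toNat - 17) := by omega
      rw [hn, List.range_add, List.map_append]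
      congr 1
      rw [List.map_map]
      calc ((List.range (days.toNat - 17)).map
            ((fun (j : Nat) => stockDauReal.get? (j : Int)) ∘ (fun x => 17 + x)))
          = List.replicate _ none := List.eq_replicate_of_mem ?_
        _ = List.replicate (days - 17).toNat none := by
            simp only [List.length_map, List.length_range]; congr 1; omega
      intro b hb
      simp only [List.mem_map, Function.comp] at hb
      obtain ⟨x, _, hx⟩ := hb
      rw [← hx]
      exact get?_stockDauReal_of_ge _ (by push_cast; omega)

-- ===== VERDICT (by name: the statement is the Claim_ definition above) =====
theorem stock_dau_real_arr_spec : Claim_equal_stock_dau_real_arr := by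
  intro days _
  unfold Spec_stock_dau_real_arr
  exact main_eq days
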